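-- pv_equiv track=rewrite | github.com/wensby/advent-of-code | python/2020_17_1.py | solve
-- ===== SOURCE A (Python) =====
-- def solve(input):
--   state = {}
--   x = 0
--   for x_line in input.splitlines():
--     current_x = {}
--     y = 0
--     for cube in x_line:
--       current_x[y] = { 0: cube }
--       y += 1
--     state[x] = current_x
--     x += 1
--
--   done_cycles_count = 0
--   while done_cycles_count < 6:
--     state = run_cycle(state)
--     done_cycles_count += 1
--
--   active_sum = 0
--   for xyz in state.values():
--     for yz in xyz.values():
--       for z in yz.values():
--         if z == '#':
--           active_sum += 1
--   return active_sum
--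
-- def run_cycle(state):
--   new_state = {}
--   coordinates_of_interest = {}
--   for x, xyz in state.items():
--     for y, yz in xyz.items():
--       for z, cube in yz.items():
--         if cube == '#':
--           add_surrounding_coordinates(coordinates_of_interest, (x,y,z))
--   for x in coordinates_of_interest:
--     for y in coordinates_of_interest[x]:
--       for z in coordinates_of_interest[x][y]:
--         new_state.setdefault(x, {}).setdefault(y, {})[z] = find_next_state(state, (x, y, z))
--   return new_state
--
-- empty = {}
--
-- def get_coordinate_state(state, coordinates):
--   x, y, z = coordinates
--   return state.get(x, empty).get(y, empty).get(z, '.')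
--
-- def find_next_state(old_state, coordinates):
--   currently_active = get_coordinate_state(old_state, coordinates) == '#'
--   active_neighbours = 0
--   for n in iterate_neighbour_activity(old_state, coordinates):
--     active_neighbours += 1 if n else 0
--     if active_neighbours > 3:
--       if currently_active:
--         return '.'
--       else:
--         return '.'
--   if currently_active:
--     return '.' if active_neighbours < 2 else '#'
--   else:
--     return '.' if active_neighbours < 3 else '#'
--
-- def iterate_neighbour_activity(old_state, coordinates):
--   x_mid, y_mid, z_mid = coordinates
--   for x in range(x_mid-1, x_mid+2):
--     for y in range(y_mid-1, y_mid+2):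
--       for z in range(z_mid-1, z_mid+2):
--         if not (x == x_mid and y == y_mid and z == z_mid):
--           yield get_coordinate_state(old_state, (x, y, z)) == '#'
--
-- def add_surrounding_coordinates(collection, middle):
--   x_mid, y_mid, z_mid = middle
--   for x in range(x_mid-1, x_mid+2):
--     for y in range(y_mid-1, y_mid+2):
--       for z in range(z_mid-1, z_mid+2):
--         collection.setdefault(x, {}).setdefault(y, set()).add(z)
-- ===== SOURCE B (Python) =====
-- def solve(input):
--   active = {(x, y, 0)
--             for x, line in enumerate(input.splitlines())
--             for y, ch in enumerate(line) if ch == '#'}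
--   for _ in range(6):
--     counter = {}
--     for (x, y, z) in active:
--       for dx in (-1, 0, 1):
--         for dy in (-1, 0, 1):
--           for dz in (-1, 0, 1):
--             if dx or dy or dz:
--               n = (x + dx, y + dy, z + dz)
--               counter[n] = counter.get(n, 0) + 1
--     active = {c for c, n in counter.items()
--               if n == 3 or (n == 2 and c in active)}
--   return len(active)
-- ===== Notes on version B (the rewrite author's own statement) =====
-- stated objective: faster
-- what changed: Replaces A's nested x->y->z dictionaries and its two-phase cycle (spread interest coordinates into nested dicts, then rescan all 26 neighbours of every cell of interest) with a flat set of active coordinates and a single counting pass per cycle: each active cell increments a counter for its 26 neighbours, and the new active set is read off the counter (count 3, or count 2 and already active).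
import Mathlib
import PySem

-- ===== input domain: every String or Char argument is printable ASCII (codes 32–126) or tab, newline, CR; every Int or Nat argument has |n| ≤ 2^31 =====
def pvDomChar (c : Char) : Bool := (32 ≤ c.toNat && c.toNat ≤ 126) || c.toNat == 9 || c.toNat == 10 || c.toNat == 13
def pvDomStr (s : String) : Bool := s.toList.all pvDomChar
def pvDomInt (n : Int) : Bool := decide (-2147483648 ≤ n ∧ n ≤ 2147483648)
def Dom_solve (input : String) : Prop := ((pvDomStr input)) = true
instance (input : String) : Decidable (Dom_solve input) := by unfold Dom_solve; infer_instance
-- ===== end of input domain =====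

-- B replaces A's nested x→y→z dictionaries and two-phase spread-then-rescan cycle by a flat
-- set of active coordinates and one neighbour-counting pass per cycle (objective: faster; measured faster in a timing run).

-- ===== PORT A =====
abbrev C3 : Type := Int × Int × Int
abbrev D3 : Type := PySem.Dict Int (PySem.Dict Int (PySem.Dict Int Char))

-- A's get_coordinate_state
def getCoord (s : D3) (c : C3) : Char :=
  ((s.getD c.1 PySem.Dict.empty).getD c.2.1 PySem.Dict.empty).getD c.2.2 '.'

-- A's iterate_neighbour_activity, materialised as the list of the booleans the generator yields
def neighbourList (s : D3) (c : C3) : List Bool :=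
  (PySem.List.pyRange (c.1 - 1) (c.1 + 2) 1).flatMap fun x =>
    (PySem.List.pyRange (c.2.1 - 1) (c.2.1 + 2) 1).flatMap fun y =>
      (PySem.List.pyRange (c.2.2 - 1) (c.2.2 + 2) 1).flatMap fun z =>
        if ¬(x = c.1 ∧ y = c.2.1 ∧ z = c.2.2) then [getCoord s (x, y, z) == '#'] else []

-- the 'for n in …' loop of A's find_next_state, with its early return
def fnsLoop (ca : Bool) : List Bool → Int → Char
  | [], acc => if ca then (if acc < 2 then '.' else '#') else (if acc < 3 then '.' else '#')
  | b :: rest, acc =>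
      let acc' := acc + (if b then 1 else 0)
      if acc' > 3 then (if ca then '.' else '.') else fnsLoop ca rest acc'

def findNextState (s : D3) (c : C3) : Char :=
  fnsLoop (getCoord s c == '#') (neighbourList s c) 0

-- A's add_surrounding_coordinates
def addSurrounding (coll : PySem.Dict Int (PySem.Dict Int (PySem.Set Int))) (m : C3) :
    PySem.Dict Int (PySem.Dict Int (PySem.Set Int)) :=
  (PySem.List.pyRange (m.1 - 1) (m.1 + 2) 1).foldl (fun coll x =>
    (PySem.List.pyRange (m.2.1 - 1) (m.2.1 + 2) 1).foldl (fun coll y =>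
      (PySem.List.pyRange (m.2.2 - 1) (m.2.2 + 2) 1).foldl (fun coll z =>
        coll.modify x PySem.Dict.empty (fun dx =>
          dx.modify y PySem.Set.empty (fun sy => PySem.Set.add sy z))) coll) coll) coll

def runCycle (s : D3) : D3 :=
  let interest := s.items.foldl (fun coll p =>
    p.2.items.foldl (fun coll q =>
      q.2.items.foldl (fun coll r =>
        if r.2 == '#' then addSurrounding coll (p.1, q.1, r.1) else coll) coll) coll)
    PySem.Dict.empty
  interest.items.foldl (fun ns p =>
    p.2.items.foldl (fun ns q =>
      q.2.foldl (fun ns z =>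
        ns.modify p.1 PySem.Dict.empty (fun dx =>
          dx.modify q.1 PySem.Dict.empty (fun dy =>
            dy.insert z (findNextState s (p.1, q.1, z))))) ns) ns)
    PySem.Dict.empty

def solve (input : String) : Int :=
  let state : D3 := (PySem.List.enumerate (PySem.Str.splitlines input) 0).foldl
    (fun st p => st.insert p.1
      ((PySem.List.enumerate p.2.toList 0).foldl
        (fun cx q => cx.insert q.1 (PySem.Dict.empty.insert 0 q.2)) PySem.Dict.empty))
    PySem.Dict.empty
  let state := (List.range 6).foldl (fun s _ => runCycle s) state
  state.values.foldl (fun acc xyz =>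
    xyz.values.foldl (fun acc yz =>
      yz.values.foldl (fun acc z => if z == '#' then acc + 1 else acc) acc) acc) 0

-- ===== PORT B =====
def nbrsB (c : C3) : List C3 :=
  ([-1, 0, 1] : List Int).flatMap fun dx =>
    ([-1, 0, 1] : List Int).flatMap fun dy =>
      ([-1, 0, 1] : List Int).flatMap fun dz =>
        if ¬(dx = 0 ∧ dy = 0 ∧ dz = 0) then [(c.1 + dx, c.2.1 + dy, c.2.2 + dz)] else []

def stepB (active : PySem.Set C3) : PySem.Set C3 :=
  let counter : PySem.Dict C3 Int := active.foldl (fun d c =>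
    (nbrsB c).foldl (fun d n => d.insert n (d.getD n 0 + 1)) d) PySem.Dict.empty
  PySem.Set.ofList
    (((counter.items).filter (fun p => p.2 == 3 || (p.2 == 2 && PySem.Set.contains active p.1))).map (·.1))

def solve_alt (input : String) : Int :=
  let active : PySem.Set C3 := PySem.Set.ofList
    ((PySem.List.enumerate (PySem.Str.splitlines input) 0).flatMap fun p =>
      (PySem.List.enumerate p.2.toList 0).flatMap fun q =>
        if q.2 == '#' then [(p.1, q.1, (0 : Int))] else [])
  let active := (List.range 6).foldl (fun a _ => stepB a) active
  PySem.Set.len active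

-- ===== PRECONDITION & SPEC =====
def Spec_solve (input : String) (out : Int) : Prop := out = solve_alt input
instance (input : String) (out : Int) : Decidable (Spec_solve input out) := by unfold Spec_solve; infer_instance

-- ===== CLAIM (what is proved, stated in full; the proofs are below) =====
def Claim_equal_solve : Prop := ∀ (input : String), Dom_solve input → Spec_solve input (solve input)

-- ===== LEMMAS AND PROOFS =====

abbrev I2S : Type := PySem.Dict Int (PySem.Dict Int (PySem.Set Int))

def isA (s : D3) (c : C3) : Bool := getCoord s c == '#'

lemma pyRange3 (a : Int) : PySem.List.pyRange (a - 1) (a + 2) 1 = [a - 1, a, a + 1] := by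
  rw [PySem.List.pyRange_one_cons (by omega), PySem.List.pyRange_one_cons (by omega),
      PySem.List.pyRange_one_cons (by omega), PySem.List.pyRange_one_eq_nil (by omega)]
  norm_num

lemma mem_nbrsB (a c : C3) :
    a ∈ nbrsB c ↔ (a ≠ c ∧ c.1 - 1 ≤ a.1 ∧ a.1 ≤ c.1 + 1 ∧ c.2.1 - 1 ≤ a.2.1 ∧ a.2.1 ≤ c.2.1 + 1 ∧
      c.2.2 - 1 ≤ a.2.2 ∧ a.2.2 ≤ c.2.2 + 1) := by
  obtain ⟨x, y, z⟩ := c; obtain ⟨ax, ay, az⟩ := a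
  simp only [nbrsB, List.mem_flatMap, List.mem_cons, List.not_mem_nil, or_false,
    List.mem_ite_nil_right, Prod.mk.injEq, ne_eq, not_and]
  constructor
  · rintro ⟨dx, hx, dy, hy, dz, hz, hc, h1, h2, h3⟩
    subst h1; subst h2; subst h3
    omega
  · rintro h
    exact ⟨ax - x, by omega, ay - y, by omega, az - z, by omega, by constructor <;> omega⟩

def block27 (m : C3) : List C3 :=
  (PySem.List.pyRange (m.1 - 1) (m.1 + 2) 1).flatMap fun x =>
    (PySem.List.pyRange (m.2.1 - 1) (m.2.1 + 2) 1).flatMap fun y =>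
      (PySem.List.pyRange (m.2.2 - 1) (m.2.2 + 2) 1).map fun z => ((x, y, z) : C3)

lemma mem_block27 (m c : C3) :
    c ∈ block27 m ↔ (m.1 - 1 ≤ c.1 ∧ c.1 ≤ m.1 + 1 ∧ m.2.1 - 1 ≤ c.2.1 ∧ c.2.1 ≤ m.2.1 + 1 ∧
      m.2.2 - 1 ≤ c.2.2 ∧ c.2.2 ≤ m.2.2 + 1) := by
  obtain ⟨x, y, z⟩ := m; obtain ⟨cx, cy, cz⟩ := c
  simp only [block27, pyRange3, List.mem_flatMap, List.mem_map, List.mem_cons,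
    List.not_mem_nil, or_false, Prod.mk.injEq]
  constructor
  · rintro ⟨dx, hx, dy, hy, dz, hz, h1, h2, h3⟩
    omega
  · rintro h
    exact ⟨cx, by omega, cy, by omega, cz, by omega, rfl, rfl, rfl⟩

lemma nbrsB_symm (a c : C3) : a ∈ nbrsB c ↔ c ∈ nbrsB a := by
  simp only [mem_nbrsB]
  constructor <;> (rintro ⟨h, hb⟩; exact ⟨fun he => h he.symm, by omega⟩)

lemma nodup_nbrsB (c : C3) : (nbrsB c).Nodup := by
  obtain ⟨x, y, z⟩ := c
  simp only [nbrsB]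
  norm_num [List.flatMap_cons, List.nodup_append, Prod.ext_iff]

lemma neighbourList_eq (s : D3) (c : C3) :
    neighbourList s c = (nbrsB c).map (fun a => getCoord s a == '#') := by
  obtain ⟨x, y, z⟩ := c
  have e1 : ∀ a : Int, (a - 1 = a) = False := by intro a; simp
  have e2 : ∀ a : Int, (a + 1 = a) = False := by intro a; simp
  have e3 : ∀ a : Int, a + (-1) = a - 1 := by intro a; omega
  have e4 : ∀ a : Int, a + (0:Int) = a := by intro a; omega
  simp only [neighbourList, nbrsB, pyRange3, List.flatMap_cons, List.flatMap_nil,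
    List.map_nil, List.append_nil, e1, e2, e3, e4,
    not_true_eq_false, not_false_eq_true, and_true, true_and, and_false,
    if_true, if_false, List.map_append]
  simp

def RuleB (act : C3 → Bool) (c : C3) : Bool :=
  ((nbrsB c).countP act == 3) || (((nbrsB c).countP act == 2) && act c)

lemma fnsLoop_spec (ca : Bool) (l : List Bool) (acc : Int) (h : 0 ≤ acc) (h3 : acc ≤ 3) :
    fnsLoop ca l acc =
      (if 3 < acc + (l.countP id : Int) then '.'
       else if ca then (if acc + (l.countP id : Int) < 2 then '.' else '#')
       else (if acc + (l.countP id : Int) < 3 then '.' else '#')) := by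
  induction l generalizing acc with
  | nil =>
    simp only [fnsLoop, List.countP_nil, Nat.cast_zero, add_zero]
    rw [if_neg (show ¬(3 < acc) by omega)]
  | cons b rest ih =>
    have hc : (List.countP id (b :: rest) : Int) = (if b then 1 else 0) + (rest.countP id : Int) := by
      cases b <;> simp <;> omega
    have hr : (0:Int) ≤ (rest.countP id : Int) := by positivity
    simp only [fnsLoop, hc]
    have hbib : (0:Int) ≤ (if b then (1:Int) else 0) ∧ (if b then (1:Int) else 0) ≤ 1 := by
      cases b <;> simp
    by_cases h1 : acc + (if b then (1:Int) else 0) > 3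
    · rw [if_pos h1, if_pos (show 3 < acc + ((if b then (1:Int) else 0) + (rest.countP id : Int)) by omega)]
      cases ca <;> rfl
    · rw [if_neg h1, ih _ (by omega) (by omega)]
      have harr : acc + (if b then (1:Int) else 0) + (rest.countP id : Int)
           = acc + ((if b then (1:Int) else 0) + (rest.countP id : Int)) := by ring
      rw [harr]

lemma findNext_hash (s : D3) (c : C3) :
    (findNextState s c = '#') ↔ RuleB (isA s) c = true := by
  have hn : (neighbourList s c).countP id = (nbrsB c).countP (isA s) := by
    rw [neighbourList_eq, List.countP_map]; rfl
  rw [findNextState, fnsLoop_spec _ _ 0 le_rfl (by omega)]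
  simp only [hn, RuleB, isA]
  set n := (nbrsB c).countP (isA s) with hdef
  have h0 : (0:Int) + (n:Int) = (n:Int) := by ring
  rw [h0]
  rcases hca : (getCoord s c == '#') with _ | _ <;>
    · simp only [Bool.false_eq_true, if_false, if_true, Bool.and_false, Bool.and_true,
        Bool.or_false]
      split_ifs <;> simp_all <;> omega

def add1 (coll : I2S) (c : C3) : I2S :=
  coll.modify c.1 PySem.Dict.empty (fun dx =>
    dx.modify c.2.1 PySem.Set.empty (fun sy => PySem.Set.add sy c.2.2))
def asg (v : C3 → Char) (ns : D3) (c : C3) : D3 :=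
  ns.modify c.1 PySem.Dict.empty (fun dx =>
    dx.modify c.2.1 PySem.Dict.empty (fun dy => dy.insert c.2.2 (v c)))

lemma getD_foldl_modifyK {κ β α : Type} [BEq κ] [LawfulBEq κ] [DecidableEq κ]
    (k : α → κ) (f : α → β → β) (d0 : β) (L : List α) (d : PySem.Dict κ β) (x : κ) :
    (L.foldl (fun d c => d.modify (k c) d0 (f c)) d).getD x d0 =
      (L.filter (fun c => k c == x)).foldl (fun b c => f c b) (d.getD x d0) := by
  induction L generalizing d with
  | nil => rfl
  | cons a t ih =>
    simp only [List.foldl_cons, List.filter_cons]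
    by_cases hk : k a = x
    · have hb : (k a == x) = true := by simp [hk]
      simp only [hb, if_pos, ih, PySem.Dict.getD_modify, hk]
      simp
    · have : (k a == x) = false := by simp [hk]
      simp only [this, Bool.false_eq_true, if_false, ih]
      rw [PySem.Dict.getD_modify, if_neg (fun he => hk he.symm)]

lemma getCoord_asg (v : C3 → Char) (ns : D3) (a c : C3) :
    getCoord (asg v ns a) c = if c = a then v a else getCoord ns c := by
  simp only [getCoord, asg, PySem.Dict.getD_modify]
  by_cases h1 : c.1 = a.1
  · rw [if_pos h1]
    rw [PySem.Dict.getD_modify]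
    by_cases h2 : c.2.1 = a.2.1
    · rw [if_pos h2]
      have : ((ns.getD a.1 PySem.Dict.empty).getD a.2.1 PySem.Dict.empty).insert a.2.2 (v a)
        = _ := rfl
      rw [PySem.Dict.getD_insert]
      by_cases h3 : c.2.2 = a.2.2
      · rw [if_pos h3, if_pos (by exact Prod.ext h1 (Prod.ext h2 h3))]
      · rw [if_neg h3, if_neg (by intro he; exact h3 (by rw [he]))]
        rw [h1, h2]
    · rw [if_neg h2, if_neg (by intro he; exact h2 (by rw [he]))]
      rw [h1]
  · rw [if_neg h1, if_neg (by intro he; exact h1 (by rw [he]))]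

lemma getCoord_foldl_asg (v : C3 → Char) (L : List C3) (ns : D3) (c : C3) :
    getCoord (L.foldl (asg v) ns) c = if c ∈ L then v c else getCoord ns c := by
  induction L generalizing ns with
  | nil => simp
  | cons a t ih =>
    simp only [List.foldl_cons, ih, List.mem_cons, getCoord_asg]
    by_cases ht : c ∈ t
    · rw [if_pos ht, if_pos (Or.inr ht)]
    · rw [if_neg ht]
      by_cases ha : c = a
      · rw [if_pos ha, if_pos (Or.inl ha), ha]
      · rw [if_neg ha, if_neg (by rintro (h|h); exact ha h; exact ht h)]

def inI (coll : I2S) (c : C3) : Prop :=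
  c.2.2 ∈ ((coll.getD c.1 PySem.Dict.empty).getD c.2.1 PySem.Set.empty : List Int)

lemma inI_add1 (coll : I2S) (a c : C3) : inI (add1 coll a) c ↔ c = a ∨ inI coll c := by
  simp only [inI, add1, PySem.Dict.getD_modify]
  by_cases h1 : c.1 = a.1
  · rw [if_pos h1, PySem.Dict.getD_modify]
    by_cases h2 : c.2.1 = a.2.1
    · rw [if_pos h2, PySem.Set.mem_add]
      rw [h1, h2]
      constructor
      · rintro (h | h)
        · exact Or.inr h
        · exact Or.inl (Prod.ext h1 (Prod.ext h2 h))
      · rintro (h | h)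
        · exact Or.inr (by rw [h])
        · exact Or.inl h
    · rw [if_neg h2, h1]
      constructor
      · exact fun h => Or.inr h
      · rintro (h | h)
        · exact absurd (by rw [h]) h2
        · exact h
  · rw [if_neg h1]
    constructor
    · exact fun h => Or.inr h
    · rintro (h | h)
      · exact absurd (by rw [h]) h1
      · exact h

lemma inI_foldl_add1 (M : List C3) (coll : I2S) (c : C3) :
    inI (M.foldl add1 coll) c ↔ c ∈ M ∨ inI coll c := by
  induction M generalizing coll with
  | nil => simp
  | cons a t ih =>
    simp only [List.foldl_cons, ih, inI_add1, List.mem_cons]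
    tauto

lemma addSurrounding_eq (coll : I2S) (m : C3) :
    addSurrounding coll m = (block27 m).foldl add1 coll := by
  simp only [addSurrounding, block27, pyRange3, List.foldl_cons, List.foldl_nil,
    List.flatMap_cons, List.flatMap_nil, List.map_cons, List.map_nil, List.append_nil,
    List.foldl_append, add1]

def actList (d : D3) : List C3 :=
  d.items.flatMap fun p => p.2.items.flatMap fun q =>
    (q.2.items.filter (fun r => r.2 == '#')).map fun r => ((p.1, q.1, r.1) : C3)

def interestOf (s : D3) : I2S := ((actList s).flatMap block27).foldl add1 PySem.Dict.empty

lemma interest_eq (s : D3) :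
    s.items.foldl (fun coll p =>
      p.2.items.foldl (fun coll q =>
        q.2.items.foldl (fun coll r =>
          if r.2 == '#' then addSurrounding coll (p.1, q.1, r.1) else coll) coll) coll)
      PySem.Dict.empty = interestOf s := by
  rw [interestOf, actList, List.foldl_flatMap, List.foldl_flatMap]
  congr 1; funext coll p
  rw [List.foldl_flatMap]
  congr 1; funext coll q
  rw [List.foldl_map, List.foldl_filter]
  congr 1; funext coll r
  split_ifs with h
  · exact addSurrounding_eq coll (p.1, q.1, r.1)
  · rfl

def trip (d : PySem.Dict Int (PySem.Dict Int (PySem.Set Int))) : List C3 :=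
  d.items.flatMap fun p => p.2.items.flatMap fun q => q.2.map fun z => ((p.1, q.1, z) : C3)

def Good3 (d : D3) : Prop :=
  d.keys.Nodup ∧ (∀ x, (d.getD x PySem.Dict.empty).keys.Nodup) ∧
    (∀ x y, ((d.getD x PySem.Dict.empty).getD y PySem.Dict.empty).keys.Nodup)

lemma runCycle_eq (s : D3) :
    runCycle s = (trip (interestOf s)).foldl (asg (findNextState s)) PySem.Dict.empty := by
  rw [runCycle, interest_eq, trip, List.foldl_flatMap]
  congr 1; funext ns p
  rw [List.foldl_flatMap]
  congr 1; funext ns q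
  rw [List.foldl_map]
  rfl

lemma good2_interestOf (s : D3) :
    (interestOf s).keys.Nodup ∧ ∀ x, ((interestOf s).getD x PySem.Dict.empty).keys.Nodup := by
  constructor
  · exact PySem.Dict.nodup_keys_foldl_modify_key ((actList s).flatMap block27)
      (fun c : C3 => c.1) PySem.Dict.empty
      (fun _ c => fun dx => dx.modify c.2.1 PySem.Set.empty (fun sy => sy.add c.2.2))
      PySem.Dict.empty (by simp [PySem.Dict.keys_empty])
  · intro x
    have h := getD_foldl_modifyK (fun c : C3 => c.1)
      (fun c dx => dx.modify c.2.1 PySem.Set.empty (fun sy => sy.add c.2.2))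
      PySem.Dict.empty ((actList s).flatMap block27) PySem.Dict.empty x
    rw [interestOf]
    rw [show ((actList s).flatMap block27).foldl add1 PySem.Dict.empty
      = ((actList s).flatMap block27).foldl (fun d c => d.modify c.1 PySem.Dict.empty
          (fun dx => dx.modify c.2.1 PySem.Set.empty (fun sy => sy.add c.2.2))) PySem.Dict.empty
      from rfl]
    rw [h, PySem.Dict.getD_empty]
    exact PySem.Dict.nodup_keys_foldl_modify_key _ (fun c : C3 => c.2.1) PySem.Set.empty
      (fun _ c => fun sy => sy.add c.2.2) PySem.Dict.empty (by simp [PySem.Dict.keys_empty])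

lemma not_contains_of_not_mem_keys {ν : Type} (d : PySem.Dict Int ν) (k : Int)
    (h : k ∉ d.keys) : d.contains k = false := by
  rcases hcc : d.contains k with _ | _
  · rfl
  · exact absurd ((PySem.Dict.contains_iff_mem_keys d k).1 hcc) h

lemma mem_trip (d : PySem.Dict Int (PySem.Dict Int (PySem.Set Int)))
    (h1 : d.keys.Nodup) (h2 : ∀ x, (d.getD x PySem.Dict.empty).keys.Nodup) (c : C3) :
    c ∈ trip d ↔ c.2.2 ∈ ((d.getD c.1 PySem.Dict.empty).getD c.2.1 PySem.Set.empty : List Int) := by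
  rw [trip]
  simp only [List.mem_flatMap, List.mem_map]
  constructor
  · rintro ⟨p, hp, q, hq, z, hz, rfl⟩
    have e1 : d.getD p.1 PySem.Dict.empty = p.2 :=
      PySem.Dict.getD_of_mem_items d hp h1 PySem.Dict.empty
    have hn2 : p.2.keys.Nodup := by rw [← e1]; exact h2 p.1
    have e2 : p.2.getD q.1 PySem.Set.empty = q.2 :=
      PySem.Dict.getD_of_mem_items p.2 hq hn2 PySem.Set.empty
    show z ∈ (d.getD p.1 PySem.Dict.empty).getD q.1 PySem.Set.empty
    rw [e1, e2]; exact hz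
  · intro hm
    have hk1 : c.1 ∈ d.keys := by
      by_contra hx
      rw [PySem.Dict.getD_of_not_contains d PySem.Dict.empty
        (not_contains_of_not_mem_keys d c.1 hx)] at hm
      rw [PySem.Dict.getD_empty] at hm
      exact (List.not_mem_nil) hm
    have hk2 : c.2.1 ∈ (d.getD c.1 PySem.Dict.empty).keys := by
      by_contra hy
      rw [PySem.Dict.getD_of_not_contains _ PySem.Set.empty
        (not_contains_of_not_mem_keys _ c.2.1 hy)] at hm
      exact (List.not_mem_nil) hm
    refine ⟨(c.1, d.getD c.1 PySem.Dict.empty), ?_,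
            (c.2.1, (d.getD c.1 PySem.Dict.empty).getD c.2.1 PySem.Set.empty), ?_,
            c.2.2, hm, rfl⟩
    · rw [PySem.Dict.items_eq_map_keys d h1 PySem.Dict.empty]
      exact List.mem_map.2 ⟨c.1, hk1, rfl⟩
    · rw [PySem.Dict.items_eq_map_keys _ (h2 c.1) PySem.Set.empty]
      exact List.mem_map.2 ⟨c.2.1, hk2, rfl⟩

lemma inI_interest_iff (s : D3) (c : C3) :
    inI (interestOf s) c ↔ ∃ a ∈ actList s, c ∈ block27 a := by
  rw [interestOf, inI_foldl_add1]
  simp only [List.mem_flatMap, inI, PySem.Dict.getD_empty]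
  constructor
  · rintro (h | h)
    · exact h
    · exact absurd h (List.not_mem_nil)
  · exact fun h => Or.inl h

lemma asg_fold_shape (v : C3 → Char) (L : List C3) :
    L.foldl (asg v) PySem.Dict.empty
      = L.foldl (fun d c => d.modify c.1 PySem.Dict.empty
          (fun dx => dx.modify c.2.1 PySem.Dict.empty (fun dy => dy.insert c.2.2 (v c))))
          PySem.Dict.empty := rfl

lemma good3_foldl_asg (v : C3 → Char) (L : List C3) : Good3 (L.foldl (asg v) PySem.Dict.empty) := by
  refine ⟨?_, ?_, ?_⟩
  · rw [asg_fold_shape]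
    exact PySem.Dict.nodup_keys_foldl_modify_key L (fun c : C3 => c.1) PySem.Dict.empty
      (fun _ c => fun dx => dx.modify c.2.1 PySem.Dict.empty (fun dy => dy.insert c.2.2 (v c)))
      PySem.Dict.empty (by simp [PySem.Dict.keys_empty])
  · intro x
    rw [asg_fold_shape, getD_foldl_modifyK (fun c : C3 => c.1)
      (fun c dx => dx.modify c.2.1 PySem.Dict.empty (fun dy => dy.insert c.2.2 (v c)))
      PySem.Dict.empty L PySem.Dict.empty x, PySem.Dict.getD_empty]
    exact PySem.Dict.nodup_keys_foldl_modify_key _ (fun c : C3 => c.2.1) PySem.Dict.empty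
      (fun _ c => fun dy => dy.insert c.2.2 (v c)) PySem.Dict.empty (by simp [PySem.Dict.keys_empty])
  · intro x y
    rw [asg_fold_shape, getD_foldl_modifyK (fun c : C3 => c.1)
      (fun c dx => dx.modify c.2.1 PySem.Dict.empty (fun dy => dy.insert c.2.2 (v c)))
      PySem.Dict.empty L PySem.Dict.empty x, PySem.Dict.getD_empty]
    rw [getD_foldl_modifyK (fun c : C3 => c.2.1)
      (fun c dy => dy.insert c.2.2 (v c)) PySem.Dict.empty _ PySem.Dict.empty y,
      PySem.Dict.getD_empty]
    exact PySem.Dict.nodup_keys_foldl_insert_key _ (fun c : C3 => c.2.2)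
      (fun _ c => v c) PySem.Dict.empty (by simp [PySem.Dict.keys_empty])

lemma good3_runCycle (s : D3) : Good3 (runCycle s) := by
  rw [runCycle_eq]; exact good3_foldl_asg _ _

lemma mem_actList (d : D3) (h : Good3 d) (c : C3) : c ∈ actList d ↔ isA d c = true := by
  obtain ⟨h1, h2, h3⟩ := h
  rw [actList]
  simp only [List.mem_flatMap, List.mem_map, List.mem_filter]
  constructor
  · rintro ⟨p, hp, q, hq, r, ⟨hr, hhash⟩, rfl⟩
    have e1 : d.getD p.1 PySem.Dict.empty = p.2 :=
      PySem.Dict.getD_of_mem_items d hp h1 PySem.Dict.empty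
    have hn2 : p.2.keys.Nodup := by rw [← e1]; exact h2 p.1
    have e2 : p.2.getD q.1 PySem.Dict.empty = q.2 :=
      PySem.Dict.getD_of_mem_items p.2 hq hn2 PySem.Dict.empty
    have hn3 : q.2.keys.Nodup := by rw [← e2]; exact (e1 ▸ h3 p.1 q.1)
    have e3 : q.2.getD r.1 '.' = r.2 :=
      PySem.Dict.getD_of_mem_items q.2 hr hn3 '.'
    show (getCoord d (p.1, q.1, r.1) == '#') = true
    rw [getCoord]
    show ((d.getD p.1 PySem.Dict.empty).getD q.1 PySem.Dict.empty).getD r.1 '.' == '#'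
    rw [e1, e2, e3]
    exact hhash
  · intro hm
    rw [isA, getCoord] at hm
    have hk1 : c.1 ∈ d.keys := by
      by_contra hx
      rw [PySem.Dict.getD_of_not_contains d PySem.Dict.empty
        (not_contains_of_not_mem_keys d c.1 hx), PySem.Dict.getD_empty,
        PySem.Dict.getD_empty] at hm
      simp at hm
    have hk2 : c.2.1 ∈ (d.getD c.1 PySem.Dict.empty).keys := by
      by_contra hy
      rw [PySem.Dict.getD_of_not_contains _ PySem.Dict.empty
        (not_contains_of_not_mem_keys _ c.2.1 hy), PySem.Dict.getD_empty] at hm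
      simp at hm
    have hk3 : c.2.2 ∈ ((d.getD c.1 PySem.Dict.empty).getD c.2.1 PySem.Dict.empty).keys := by
      by_contra hz
      rw [PySem.Dict.getD_of_not_contains _ '.'
        (not_contains_of_not_mem_keys _ c.2.2 hz)] at hm
      simp at hm
    refine ⟨(c.1, d.getD c.1 PySem.Dict.empty), ?_,
            (c.2.1, (d.getD c.1 PySem.Dict.empty).getD c.2.1 PySem.Dict.empty), ?_,
            (c.2.2, ((d.getD c.1 PySem.Dict.empty).getD c.2.1 PySem.Dict.empty).getD c.2.2 '.'), ?_, rfl⟩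
    · rw [PySem.Dict.items_eq_map_keys d h1 PySem.Dict.empty]
      exact List.mem_map.2 ⟨c.1, hk1, rfl⟩
    · rw [PySem.Dict.items_eq_map_keys _ (h2 c.1) PySem.Dict.empty]
      exact List.mem_map.2 ⟨c.2.1, hk2, rfl⟩
    · refine ⟨?_, hm⟩
      rw [PySem.Dict.items_eq_map_keys _ (h3 c.1 c.2.1) '.']
      exact List.mem_map.2 ⟨c.2.2, hk3, rfl⟩

lemma nodup_of_map_fst_nodup {β : Type} (l : List (Int × β)) (h : (l.map (fun p => p.1)).Nodup) :
    l.Nodup := h.of_map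

lemma pairwise_fst_ne {β : Type} (l : List (Int × β)) (h : (l.map (fun p => p.1)).Nodup) :
    l.Pairwise (fun p q => p.1 ≠ q.1) := by
  rw [List.Nodup, List.pairwise_map] at h; exact h

lemma nodup_actList (d : D3) (h : Good3 d) : (actList d).Nodup := by
  obtain ⟨h1, h2, h3⟩ := h
  rw [actList, List.nodup_flatMap]
  refine ⟨?_, ?_⟩
  · intro p hp
    have e1 : d.getD p.1 PySem.Dict.empty = p.2 :=
      PySem.Dict.getD_of_mem_items d hp h1 PySem.Dict.empty
    have hn2 : p.2.keys.Nodup := by rw [← e1]; exact h2 p.1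
    rw [List.nodup_flatMap]
    refine ⟨?_, ?_⟩
    · intro q hq
      have e2 : p.2.getD q.1 PySem.Dict.empty = q.2 :=
        PySem.Dict.getD_of_mem_items p.2 hq hn2 PySem.Dict.empty
      have hn3 : q.2.keys.Nodup := by rw [← e2]; exact (e1 ▸ h3 p.1 q.1)
      refine List.Nodup.map_on ?_ ((nodup_of_map_fst_nodup _ hn3).filter _)
      intro r hr r' hr' he
      have hf : r.1 = r'.1 := by
        have := congrArg (fun c : C3 => c.2.2) he
        simpa using this
      exact List.inj_on_of_nodup_map hn3 (List.mem_of_mem_filter hr)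
        (List.mem_of_mem_filter hr') hf
    · refine (pairwise_fst_ne _ hn2).imp ?_
      intro q q' hne c hc hc'
      simp only [List.mem_map, List.mem_filter] at hc hc'
      obtain ⟨r, _, rfl⟩ := hc
      obtain ⟨r', _, he⟩ := hc'
      exact hne (by simpa using (congrArg (fun c : C3 => c.2.1) he).symm)
  · refine (pairwise_fst_ne _ h1).imp ?_
    intro p p' hne c hc hc'
    simp only [List.mem_flatMap, List.mem_map, List.mem_filter] at hc hc'
    obtain ⟨q, _, r, _, rfl⟩ := hc
    obtain ⟨q', _, r', _, he⟩ := hc'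
    exact hne (by simpa using (congrArg (fun c : C3 => c.1) he).symm)

lemma nbrsB_subset_block27 (a c : C3) (h : a ∈ nbrsB c) : a ∈ block27 c := by
  rw [mem_nbrsB] at h; rw [mem_block27]; exact h.2

lemma isA_runCycle (s : D3) (h : Good3 s) (c : C3) :
    isA (runCycle s) c = true ↔ RuleB (isA s) c = true := by
  have hg2 := good2_interestOf s
  rw [isA, runCycle_eq, getCoord_foldl_asg]
  have hmem : c ∈ trip (interestOf s) ↔ ∃ a, isA s a = true ∧ c ∈ block27 a := by
    rw [mem_trip _ hg2.1 hg2.2]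
    have := inI_interest_iff s c
    rw [inI] at this
    rw [this]
    constructor
    · rintro ⟨a, ha, hb⟩
      exact ⟨a, (mem_actList s h a).1 ha, hb⟩
    · rintro ⟨a, ha, hb⟩
      exact ⟨a, (mem_actList s h a).2 ha, hb⟩
  by_cases hm : c ∈ trip (interestOf s)
  · rw [if_pos hm]
    simp only [beq_iff_eq]
    exact findNext_hash s c
  · rw [if_neg hm]
    constructor
    · intro hh
      rw [show getCoord PySem.Dict.empty c = '.' from rfl] at hh
      simp at hh
    · intro hh
      exfalso
      apply hm
      rw [hmem]
      have hcp : 0 < (nbrsB c).countP (isA s) := by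
        rw [RuleB] at hh
        rcases Bool.or_eq_true_iff.1 hh with h3 | h2
        · have : (nbrsB c).countP (isA s) = 3 := by simpa using h3
          omega
        · have : (nbrsB c).countP (isA s) = 2 := by
            have := (Bool.and_eq_true_iff.1 h2).1
            simpa using this
          omega
      obtain ⟨b, hb, hab⟩ := List.countP_pos_iff.1 hcp
      exact ⟨b, hab, nbrsB_subset_block27 c b ((nbrsB_symm b c).1 hb)⟩

lemma countP_mem_comm {α : Type} [BEq α] [LawfulBEq α] (l1 l2 : List α) (h1 : l1.Nodup) (h2 : l2.Nodup) :
    l1.countP (fun a => decide (a ∈ l2)) = l2.countP (fun a => decide (a ∈ l1)) := by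
  rw [List.countP_eq_length_filter, List.countP_eq_length_filter]
  have hp : (l1.filter (fun a => decide (a ∈ l2))).Perm (l2.filter (fun a => decide (a ∈ l1))) := by
    rw [List.perm_ext_iff_of_nodup (h1.filter _) (h2.filter _)]
    intro a
    simp only [List.mem_filter, decide_eq_true_eq]
    tauto
  exact hp.length_eq

lemma count_flatMap_nbrsB (act : List C3) (c : C3) :
    (act.flatMap nbrsB).count c = act.countP (fun a => decide (c ∈ nbrsB a)) := by
  induction act with
  | nil => simp
  | cons a t ih =>
    rw [List.flatMap_cons, List.count_append, List.countP_cons, ih]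
    by_cases hm : c ∈ nbrsB a
    · rw [List.count_eq_one_of_mem (nodup_nbrsB a) hm]
      simp [hm, Nat.add_comm]
    · rw [List.count_eq_zero_of_not_mem hm]
      simp [hm]

lemma stepB_mem (act : PySem.Set C3) (hnd : act.Nodup) (c : C3) :
    c ∈ stepB act ↔ RuleB (fun a => decide (a ∈ act)) c = true := by
  have hcounter : (act.foldl (fun d c => (nbrsB c).foldl
        (fun d n => d.insert n (d.getD n 0 + 1)) d) (PySem.Dict.empty : PySem.Dict C3 Int))
      = (act.flatMap nbrsB).foldl (fun d n => d.insert n (d.getD n 0 + 1))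
          (PySem.Dict.empty : PySem.Dict C3 Int) := by
    rw [List.foldl_flatMap]
  have hknd : ((act.flatMap nbrsB).foldl (fun d n => d.insert n (d.getD n 0 + 1))
      (PySem.Dict.empty : PySem.Dict C3 Int)).keys.Nodup :=
    PySem.Dict.nodup_keys_foldl_insert _ _ PySem.Dict.empty (by simp [PySem.Dict.keys_empty])
  have hgetD : ∀ v, ((act.flatMap nbrsB).foldl (fun d n => d.insert n (d.getD n 0 + 1))
      (PySem.Dict.empty : PySem.Dict C3 Int)).getD v 0 = (((act.flatMap nbrsB).count v : Int)) := by
    intro v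
    rw [PySem.Dict.getD_foldl_insert_add_one _ PySem.Dict.empty v, PySem.Dict.getD_empty]
    ring
  have hkeys : ∀ v, v ∈ ((act.flatMap nbrsB).foldl (fun d n => d.insert n (d.getD n 0 + 1))
      (PySem.Dict.empty : PySem.Dict C3 Int)).keys ↔ v ∈ act.flatMap nbrsB := by
    intro v
    rw [PySem.Dict.keys_foldl_insert _ _ PySem.Dict.empty, PySem.Dict.keys_empty]
    exact PySem.Set.mem_ofList _ v
  have hN : (act.flatMap nbrsB).count c = (nbrsB c).countP (fun a => decide (a ∈ act)) := by
    rw [count_flatMap_nbrsB]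
    have e1 : act.countP (fun a => decide (c ∈ nbrsB a)) = act.countP (fun a => decide (a ∈ nbrsB c)) :=
      List.countP_congr (fun a _ => by simp only [decide_eq_true_eq]; exact nbrsB_symm c a)
    rw [e1]
    exact countP_mem_comm act (nbrsB c) hnd (nodup_nbrsB c)
  rw [stepB]
  simp only [hcounter]
  rw [PySem.Set.mem_ofList]
  simp only [List.mem_map, List.mem_filter]
  constructor
  · rintro ⟨p, ⟨hpi, hcond⟩, rfl⟩
    have hpv := PySem.Dict.getD_of_mem_items _ hpi hknd 0
    rw [hgetD p.1, hN] at hpv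
    rw [RuleB]
    rcases Bool.or_eq_true_iff.1 hcond with h3 | h2
    · have : p.2 = 3 := by simpa using h3
      rw [this] at hpv
      have : (nbrsB p.1).countP (fun a => decide (a ∈ act)) = 3 := by exact_mod_cast hpv
      simp [this]
    · obtain ⟨h2', hin⟩ := Bool.and_eq_true_iff.1 h2
      have : p.2 = 2 := by simpa using h2'
      rw [this] at hpv
      have hcnt : (nbrsB p.1).countP (fun a => decide (a ∈ act)) = 2 := by exact_mod_cast hpv
      have hmemact : p.1 ∈ act := by
        rw [PySem.Set.contains_iff] at hin
        exact hin
      simp [hcnt, hmemact]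
  · intro hr
    rw [RuleB] at hr
    have hpos : 0 < (nbrsB c).countP (fun a => decide (a ∈ act)) := by
      rcases Bool.or_eq_true_iff.1 hr with h3 | h2
      · have : (nbrsB c).countP (fun a => decide (a ∈ act)) = 3 := by simpa using h3
        omega
      · have : (nbrsB c).countP (fun a => decide (a ∈ act)) = 2 := by
          simpa using (Bool.and_eq_true_iff.1 h2).1
        omega
    have hcLf : c ∈ act.flatMap nbrsB := by
      rw [← hN] at hpos
      exact List.count_pos_iff.1 hpos
    refine ⟨(c, ((act.flatMap nbrsB).foldl (fun d n => d.insert n (d.getD n 0 + 1))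
      (PySem.Dict.empty : PySem.Dict C3 Int)).getD c 0), ⟨?_, ?_⟩, rfl⟩
    · rw [PySem.Dict.items_eq_map_keys _ hknd 0]
      exact List.mem_map.2 ⟨c, (hkeys c).2 hcLf, rfl⟩
    · rw [hgetD c, hN]
      rcases Bool.or_eq_true_iff.1 hr with h3 | h2
      · have h3' : (nbrsB c).countP (fun a => decide (a ∈ act)) = 3 := by simpa using h3
        simp [h3']
      · obtain ⟨h2', hin⟩ := Bool.and_eq_true_iff.1 h2
        have h2'' : (nbrsB c).countP (fun a => decide (a ∈ act)) = 2 := by simpa using h2'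
        have hcm : c ∈ act := of_decide_eq_true hin
        simp [h2'', hcm]

def countA (d : D3) : Int :=
  d.values.foldl (fun acc xyz =>
    xyz.values.foldl (fun acc yz =>
      yz.values.foldl (fun acc z => if z == '#' then acc + 1 else acc) acc) acc) 0

lemma countA_eq (d : D3) : countA d = ((actList d).length : Int) := by
  rw [countA, ← List.foldl_flatMap, ← List.foldl_flatMap, PySem.List.foldl_if_add_one]
  rw [show ∀ n : Int, (0:Int) + n = n from fun n => by ring]
  congr 1
  rw [List.countP_eq_length_filter, List.flatMap_assoc, List.filter_flatMap, actList]
  rw [show d.values = d.items.map (fun p => p.2) from rfl, List.flatMap_map]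
  rw [List.length_flatMap, List.length_flatMap]
  congr 1
  congr 1
  funext p
  rw [List.filter_flatMap]
  rw [show p.2.values = p.2.items.map (fun q => q.2) from rfl, List.flatMap_map]
  rw [List.length_flatMap, List.length_flatMap]
  congr 1
  congr 1
  funext q
  rw [List.length_map]
  rw [show q.2.values = q.2.items.map (fun r => r.2) from rfl, List.filter_map]
  rw [List.length_map]
  rfl

def innerOf (line : String) : PySem.Dict Int (PySem.Dict Int Char) :=
  (PySem.List.enumerate line.toList 0).foldl
    (fun cx q => cx.insert q.1 (PySem.Dict.empty.insert 0 q.2)) PySem.Dict.empty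

def init0 (input : String) : D3 :=
  (PySem.List.enumerate (PySem.Str.splitlines input) 0).foldl
    (fun st p => st.insert p.1 (innerOf p.2)) PySem.Dict.empty

lemma nodup_fst_enumerate {α : Type} (xs : List α) (s : Int) :
    ((PySem.List.enumerate xs s).map (fun p => p.1)).Nodup := by
  rw [PySem.List.map_fst_enumerate]
  exact PySem.List.nodup_pyRange_one _ _

lemma items_fresh_fold {ν : Type} (l : List (Int × String)) (f : Int × String → ν)
    (hnd : (l.map (fun p => p.1)).Nodup) :
    ((l.foldl (fun st p => st.insert p.1 (f p)) (PySem.Dict.empty : PySem.Dict Int ν)).items)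
      = l.map (fun p => (p.1, f p)) := by
  have := PySem.Dict.items_foldl_insert_fresh l (fun p => p.1) f PySem.Dict.empty
    (fun a _ => PySem.Dict.contains_empty _) hnd
  simpa using this

lemma items_init0 (input : String) :
    (init0 input).items = (PySem.List.enumerate (PySem.Str.splitlines input) 0).map
      (fun p => (p.1, innerOf p.2)) := by
  rw [init0]
  exact items_fresh_fold _ _ (nodup_fst_enumerate _ _)

lemma keys_nodup_init0 (input : String) : (init0 input).keys.Nodup := by
  rw [show (init0 input).keys = (init0 input).items.map (fun p => p.1) from rfl, items_init0,
    List.map_map]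
  exact nodup_fst_enumerate _ _

lemma items_innerOf (line : String) :
    (innerOf line).items = (PySem.List.enumerate line.toList 0).map
      (fun q => (q.1, PySem.Dict.empty.insert 0 q.2)) := by
  rw [innerOf]
  have := PySem.Dict.items_foldl_insert_fresh (PySem.List.enumerate line.toList 0)
    (fun q => q.1) (fun q => (PySem.Dict.empty.insert 0 q.2 : PySem.Dict Int Char))
    PySem.Dict.empty (fun a _ => PySem.Dict.contains_empty _) (nodup_fst_enumerate _ _)
  simpa using this

lemma keys_nodup_innerOf (line : String) : (innerOf line).keys.Nodup := by
  rw [show (innerOf line).keys = (innerOf line).items.map (fun p => p.1) from rfl, items_innerOf,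
    List.map_map]
  exact nodup_fst_enumerate _ _

lemma mem_items_getD {ν : Type} (d : PySem.Dict Int ν) (x : Int) (dflt : ν)
    (hnd : d.keys.Nodup) (hx : x ∈ d.keys) : (x, d.getD x dflt) ∈ d.items := by
  rw [PySem.Dict.items_eq_map_keys d hnd dflt]
  exact List.mem_map.2 ⟨x, hx, rfl⟩

lemma getD_init0_cases (input : String) (x : Int) :
    (init0 input).getD x PySem.Dict.empty = PySem.Dict.empty ∨
      ∃ line, (init0 input).getD x PySem.Dict.empty = innerOf line := by
  by_cases hx : x ∈ (init0 input).keys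
  · have hm := mem_items_getD _ x PySem.Dict.empty (keys_nodup_init0 input) hx
    rw [items_init0] at hm
    obtain ⟨p, _, he⟩ := List.mem_map.1 hm
    right
    exact ⟨p.2, (Prod.mk.injEq _ _ _ _ ▸ he).2.symm⟩
  · left
    exact PySem.Dict.getD_of_not_contains _ _ (not_contains_of_not_mem_keys _ _ hx)

lemma getD_innerOf_cases (line : String) (y : Int) :
    (innerOf line).getD y PySem.Dict.empty = PySem.Dict.empty ∨
      ∃ ch, (innerOf line).getD y PySem.Dict.empty = PySem.Dict.empty.insert 0 ch := by
  by_cases hy : y ∈ (innerOf line).keys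
  · have hm := mem_items_getD _ y PySem.Dict.empty (keys_nodup_innerOf line) hy
    rw [items_innerOf] at hm
    obtain ⟨q, _, he⟩ := List.mem_map.1 hm
    right
    exact ⟨q.2, (Prod.mk.injEq _ _ _ _ ▸ he).2.symm⟩
  · left
    exact PySem.Dict.getD_of_not_contains _ _ (not_contains_of_not_mem_keys _ _ hy)

lemma good3_init0 (input : String) : Good3 (init0 input) := by
  refine ⟨keys_nodup_init0 input, ?_, ?_⟩
  · intro x
    rcases getD_init0_cases input x with h | ⟨line, h⟩
    · rw [h]; simp [PySem.Dict.keys_empty]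
    · rw [h]; exact keys_nodup_innerOf line
  · intro x y
    rcases getD_init0_cases input x with h | ⟨line, h⟩
    · rw [h, PySem.Dict.getD_empty]; simp [PySem.Dict.keys_empty]
    · rw [h]
      rcases getD_innerOf_cases line y with h2 | ⟨ch, h2⟩
      · rw [h2]; simp [PySem.Dict.keys_empty]
      · rw [h2]
        exact PySem.Dict.nodup_keys_insert PySem.Dict.empty 0 ch (by simp [PySem.Dict.keys_empty])

def L0list (input : String) : List C3 :=
  (PySem.List.enumerate (PySem.Str.splitlines input) 0).flatMap fun p =>
    (PySem.List.enumerate p.2.toList 0).flatMap fun q =>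
      if q.2 == '#' then [((p.1, q.1, (0 : Int)) : C3)] else []

lemma actList_init0 (input : String) : actList (init0 input) = L0list input := by
  rw [actList, items_init0, List.flatMap_map, L0list]
  congr 1; funext p
  rw [items_innerOf, List.flatMap_map]
  congr 1; funext q
  have hit : (PySem.Dict.empty.insert 0 q.2).items = [((0:Int), q.2)] := rfl
  rw [hit]
  rcases hch : (q.2 == '#') with _ | _
  · simp [hch]
  · simp [hch]

def act0 (input : String) : PySem.Set C3 := PySem.Set.ofList (L0list input)

def StateInv (s : D3) (act : PySem.Set C3) : Prop :=
  Good3 s ∧ act.Nodup ∧ ∀ c, (isA s c = true ↔ c ∈ act)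

lemma stateInv_init (input : String) : StateInv (init0 input) (act0 input) := by
  refine ⟨good3_init0 input, PySem.Set.nodup_ofList _, ?_⟩
  intro c
  rw [← mem_actList _ (good3_init0 input), actList_init0, act0, PySem.Set.mem_ofList]

lemma RuleB_congr (f g : C3 → Bool) (h : ∀ a, f a = g a) (c : C3) : RuleB f c = RuleB g c := by
  rw [RuleB, RuleB, List.countP_congr (fun a _ => by rw [h a]), h c]

lemma stateInv_step (s : D3) (act : PySem.Set C3) (h : StateInv s act) :
    StateInv (runCycle s) (stepB act) := by
  obtain ⟨hg, hnd, hmem⟩ := h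
  refine ⟨good3_runCycle s, PySem.Set.nodup_ofList _, ?_⟩
  intro c
  rw [isA_runCycle s hg c, stepB_mem act hnd c]
  constructor
  · intro hr
    rw [← RuleB_congr (isA s) (fun a => decide (a ∈ act))
      (fun a => by rcases hia : isA s a with _ | _
                   · symm; simp only [decide_eq_false_iff_not]
                     intro hma; have := (hmem a).2 hma; rw [hia] at this; exact Bool.false_ne_true this
                   · symm; simp only [decide_eq_true_eq]; exact (hmem a).1 hia) c]
    exact hr
  · intro hr
    rw [RuleB_congr (isA s) (fun a => decide (a ∈ act))
      (fun a => by rcases hia : isA s a with _ | _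
                   · symm; simp only [decide_eq_false_iff_not]
                     intro hma; have := (hmem a).2 hma; rw [hia] at this; exact Bool.false_ne_true this
                   · symm; simp only [decide_eq_true_eq]; exact (hmem a).1 hia) c]
    exact hr

lemma stateInv_iter (input : String) (n : Nat) :
    StateInv ((List.range n).foldl (fun s _ => runCycle s) (init0 input))
             ((List.range n).foldl (fun a _ => stepB a) (act0 input)) := by
  induction n with
  | zero => exact stateInv_init input
  | succ m ih =>
    rw [List.range_succ, List.foldl_append, List.foldl_append]
    exact stateInv_step _ _ ih

lemma final_eq (input : String) :
    countA ((List.range 6).foldl (fun s _ => runCycle s) (init0 input))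
      = PySem.Set.len ((List.range 6).foldl (fun a _ => stepB a) (act0 input)) := by
  have inv := stateInv_iter input 6
  obtain ⟨hg, hnd, hmem⟩ := inv
  rw [countA_eq]
  have h1 := nodup_actList _ hg
  have hm : ∀ c, c ∈ actList ((List.range 6).foldl (fun s _ => runCycle s) (init0 input))
      ↔ c ∈ ((List.range 6).foldl (fun a _ => stepB a) (act0 input)) :=
    fun c => (mem_actList _ hg c).trans (hmem c)
  have hp := (List.perm_ext_iff_of_nodup h1 hnd).2 hm
  rw [hp.length_eq]
  rfl

-- ===== VERDICT (by name: the statement is the Claim_ definition above) =====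
theorem solve_spec : Claim_equal_solve := by
  intro input _
  show solve input = solve_alt input
  have h1 : solve input = countA ((List.range 6).foldl (fun s _ => runCycle s) (init0 input)) := rfl
  have h2 : solve_alt input
      = PySem.Set.len ((List.range 6).foldl (fun a _ => stepB a) (act0 input)) := rfl
  rw [h1, h2, final_eq]
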